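-- pv_equiv track=rewrite | github.com/zil54/chess_analyzer | app/testing/helper1_move_numbering.py | add_move_numbers
-- ===== SOURCE A (Python) =====
-- def add_move_numbers(moves: str, starting_move: int = 1, black_to_move: bool = False) -> str:
--     """
--     Convert a space-separated move list into a numbered PGN-like string.
--
--     Examples:
--         add_move_numbers("e4 e5 Nf3 Nc6") -> "1. e4 e5 2. Nf3 Nc6"
--         add_move_numbers("e5 Nf3 Nc6", black_to_move=True) -> "1... e5 2. Nf3 Nc6"
--     """
--     tokens = moves.strip().split()
--     numbered = []
--     move_num = starting_move
--
--     i = 0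
--     if black_to_move:
--         # First token is Black's move
--         black = tokens[0]
--         numbered.append(f"{move_num}... {black}")
--         i = 1
--         move_num += 1
--
--     # Process remaining moves in White/Black pairs
--     while i < len(tokens):
--         white = tokens[i]
--         black = tokens[i + 1] if i + 1 < len(tokens) else ""
--         if black:
--             numbered.append(f"{move_num}. {white} {black}")
--         else:
--             numbered.append(f"{move_num}. {white}")
--         move_num += 1
--         i += 2
--
--     return " ".join(numbered)
-- ===== SOURCE B (Python) =====
-- def add_move_numbers(moves: str, starting_move: int = 1, black_to_move: bool = False) -> str:
--     # One token at a time with a side-to-move flag, instead of pairing tokens in steps of 2.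
--     entries = []
--     move_num = starting_move
--     white_to_move = not black_to_move
--     for tok in moves.strip().split():
--         if white_to_move:
--             entries.append(f"{move_num}. {tok}")
--             white_to_move = False
--         else:
--             if entries:
--                 entries[-1] += f" {tok}"
--             else:
--                 entries.append(f"{move_num}... {tok}")
--             move_num += 1
--             white_to_move = True
--     return " ".join(entries)
-- ===== Notes on version B (the rewrite author's own statement) =====
-- stated objective: alternative
-- what changed: Replaced the step-by-2 white/black pairing loop (with a conditional lookahead for the black move) by a single step-by-1 pass over the tokens that tracks a side-to-move flag, appending each black move to the last emitted entry.
import Mathlib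
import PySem

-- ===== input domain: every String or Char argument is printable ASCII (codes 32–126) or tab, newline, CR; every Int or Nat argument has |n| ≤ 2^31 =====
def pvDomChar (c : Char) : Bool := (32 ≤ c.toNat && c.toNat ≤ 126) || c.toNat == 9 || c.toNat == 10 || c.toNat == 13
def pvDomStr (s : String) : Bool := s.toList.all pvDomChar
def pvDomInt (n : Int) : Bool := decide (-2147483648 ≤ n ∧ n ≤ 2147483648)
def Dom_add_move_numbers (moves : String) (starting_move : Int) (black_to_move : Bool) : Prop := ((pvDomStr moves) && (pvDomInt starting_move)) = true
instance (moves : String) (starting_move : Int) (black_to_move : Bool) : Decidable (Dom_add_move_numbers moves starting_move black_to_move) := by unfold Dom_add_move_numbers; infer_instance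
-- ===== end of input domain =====

-- B replaces A's step-by-2 pairing loop by a single step-by-1 pass with a side-to-move flag (alternative decomposition, same cost).

-- ===== PORT A =====
-- A's while loop over tokens in steps of 2 (white, optional black lookahead)
def pvPairsA (move_num : Int) : List String → List String
  | [] => []
  | white :: rest =>
    match rest with
    | [] => [PySem.Int.toStr move_num ++ ". " ++ white]
    | black :: rest' =>
      if black ≠ "" then
        (PySem.Int.toStr move_num ++ ". " ++ white ++ " " ++ black) :: pvPairsA (move_num + 1) rest'
      else
        (PySem.Int.toStr move_num ++ ". " ++ white) :: pvPairsA (move_num + 1) rest'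

def add_move_numbers (moves : String) (starting_move : Int) (black_to_move : Bool) : String :=
  let tokens := PySem.Str.split₀ (PySem.Str.strip moves)
  if black_to_move then
    match tokens with
    | [] => ""  -- Python raises IndexError on tokens[0] here; excluded by Pre_
    | black :: rest =>
      PySem.Str.join " " ((PySem.Int.toStr starting_move ++ "... " ++ black) :: pvPairsA (starting_move + 1) rest)
  else
    PySem.Str.join " " (pvPairsA starting_move tokens)

-- ===== PORT B =====
-- B's loop body: state = (entries, move_num, white_to_move)
def pvStepB (st : List String × Int × Bool) (tok : String) : List String × Int × Bool :=
  match st with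
  | (entries, move_num, true) =>
    (entries ++ [PySem.Int.toStr move_num ++ ". " ++ tok], move_num, false)
  | (entries, move_num, false) =>
    if entries.isEmpty then
      ([PySem.Int.toStr move_num ++ "... " ++ tok], move_num + 1, true)
    else
      (entries.dropLast ++ [entries.getLast! ++ " " ++ tok], move_num + 1, true)

def add_move_numbers_alt (moves : String) (starting_move : Int) (black_to_move : Bool) : String :=
  let st := (PySem.Str.split₀ (PySem.Str.strip moves)).foldl pvStepB ([], starting_move, !black_to_move)
  PySem.Str.join " " st.1

-- ===== PRECONDITION & SPEC =====
-- Pre_ excludes only the inputs where A raises IndexError: black_to_move with no tokens in the move string.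
def Pre_add_move_numbers (moves : String) (starting_move : Int) (black_to_move : Bool) : Prop :=
  black_to_move = true → PySem.Str.split₀ (PySem.Str.strip moves) ≠ []
instance (moves : String) (starting_move : Int) (black_to_move : Bool) : Decidable (Pre_add_move_numbers moves starting_move black_to_move) := by unfold Pre_add_move_numbers; infer_instance

def pvWitness_add_move_numbers : String × Int × Bool := ("e5 Nf3 Nc6", 1, true)

def Spec_add_move_numbers (moves : String) (starting_move : Int) (black_to_move : Bool) (out : String) : Prop := out = add_move_numbers_alt moves starting_move black_to_move
instance (moves : String) (starting_move : Int) (black_to_move : Bool) (out : String) : Decidable (Spec_add_move_numbers moves starting_move black_to_move out) := by unfold Spec_add_move_numbers; infer_instance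

-- ===== CLAIM (what is proved, stated in full; the proofs are below) =====
def Claim_equal_add_move_numbers : Prop := ∀ (moves : String) (starting_move : Int) (black_to_move : Bool), Dom_add_move_numbers moves starting_move black_to_move → Pre_add_move_numbers moves starting_move black_to_move → Spec_add_move_numbers moves starting_move black_to_move (add_move_numbers moves starting_move black_to_move)

-- ===== LEMMAS AND PROOFS =====

-- split₀ never produces an empty token
lemma pvGo_ne_nil : ∀ (s cur : List Char) (acc : List (List Char)),
    (∀ t ∈ acc, t ≠ []) → ∀ t ∈ PySem.Chars.split₀.go s cur acc, t ≠ []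
  | [], cur, acc, h => by
    unfold PySem.Chars.split₀.go
    split_ifs with hc
    · intro t ht; exact h t (List.mem_reverse.mp ht)
    · intro t ht
      rcases List.mem_cons.mp (List.mem_reverse.mp ht) with rfl | ht'
      · simp only [List.isEmpty_iff] at hc
        intro h'; exact hc (by simpa using congrArg List.reverse h')
      · exact h t ht'
  | c :: rest, cur, acc, h => by
    unfold PySem.Chars.split₀.go
    split_ifs with h1 h2
    · exact pvGo_ne_nil rest [] acc h
    · refine pvGo_ne_nil rest [] (cur.reverse :: acc) ?_ 
      intro t ht
      rcases List.mem_cons.mp ht with rfl | ht'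
      · simp only [List.isEmpty_iff] at h2
        intro h'; exact h2 (by simpa using congrArg List.reverse h')
      · exact h t ht'
    · exact pvGo_ne_nil rest (c :: cur) acc h

lemma pvSplit_ne_empty (s : String) : ∀ t ∈ PySem.Str.split₀ s, t ≠ "" := by
  intro t ht
  simp only [PySem.Str.split₀, List.mem_map] at ht
  obtain ⟨l, hl, rfl⟩ := ht
  intro h
  exact pvGo_ne_nil s.toList [] [] (by simp) l hl
    (by have h2 := congrArg String.toList h; simpa using h2)

-- B's one-token-at-a-time fold over a token list that starts with a white move
-- produces exactly the entries of A's pairing loop.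
lemma pvFoldB_pairs : ∀ (ts out : List String) (mn : Int), (∀ t ∈ ts, t ≠ "") →
    (List.foldl pvStepB (out, mn, true) ts).1 = out ++ pvPairsA mn ts
  | [], out, mn, _ => by simp [pvPairsA]
  | [w], out, mn, _ => by simp [pvPairsA, pvStepB]
  | w :: b :: rest, out, mn, h => by
    have hb : b ≠ "" := h b (by simp)
    have ih := pvFoldB_pairs rest (out ++ [PySem.Int.toStr mn ++ ". " ++ w ++ " " ++ b]) (mn + 1)
      (fun t ht => h t (by simp [ht]))
    have e1 : pvStepB (out, mn, true) w = (out ++ [PySem.Int.toStr mn ++ ". " ++ w], mn, false) := rfl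
    have e2 : pvStepB (out ++ [PySem.Int.toStr mn ++ ". " ++ w], mn, false) b
        = (out ++ [PySem.Int.toStr mn ++ ". " ++ w ++ " " ++ b], mn + 1, true) := by
      simp only [pvStepB]
      rw [if_neg (by simp)]
      simp [List.getLast!_eq_getLast?_getD, String.append_assoc]
    calc (List.foldl pvStepB (out, mn, true) (w :: b :: rest)).1
        = (List.foldl pvStepB (pvStepB (pvStepB (out, mn, true) w) b) rest).1 := rfl
      _ = out ++ pvPairsA mn (w :: b :: rest) := by
            rw [e1, e2, ih]; simp [pvPairsA, hb]

-- ===== VERDICT (by name: the statement is the Claim_ definition above) =====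
theorem add_move_numbers_spec : Claim_equal_add_move_numbers := by
  unfold Claim_equal_add_move_numbers
  intro moves sm btm _ hpre
  unfold Spec_add_move_numbers add_move_numbers add_move_numbers_alt
  have hne := pvSplit_ne_empty (PySem.Str.strip moves)
  cases hts : PySem.Str.split₀ (PySem.Str.strip moves) with
  | nil =>
    cases btm with
    | false => simp [hts, pvPairsA]
    | true => exact absurd hts (hpre rfl)
  | cons t0 rest =>
    rw [hts] at hne
    have hrest : ∀ t ∈ rest, t ≠ "" := fun t ht => hne t (List.mem_cons_of_mem _ ht)
    cases btm with
    | false =>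
      simp only [hts, Bool.not_false, Bool.false_eq_true, if_false]
      rw [pvFoldB_pairs (t0 :: rest) [] sm hne]
      simp
    | true =>
      simp only [hts, Bool.not_true, if_true, List.foldl_cons]
      have e0 : pvStepB ([], sm, false) t0 = ([PySem.Int.toStr sm ++ "... " ++ t0], sm + 1, true) := rfl
      rw [e0, pvFoldB_pairs rest [PySem.Int.toStr sm ++ "... " ++ t0] (sm + 1) hrest]
      simp
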